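-- pv_equiv track=rewrite | github.com/AditiDas97/tsi | tsi_devices/modules/device_constants.py | info_header
-- ===== SOURCE A (Python) =====
-- def info_header(num: int, hbsz: int) -> str:
--     s = "       "
--     n = 0
--     for i in range(num):
--         if i != hbsz:
--             s += "   " + str(n)
--             n += 1
--         else:
--             n = 0
--             s += " "
--     return s
-- ===== SOURCE B (Python) =====
-- def info_header(num: int, hbsz: int) -> str:
--     def col(i: int) -> str:
--         if i == hbsz:
--             return " "
--         k = i if (hbsz < 0 or i < hbsz) else i - hbsz - 1
--         return "   " + str(k)
--     return "       " + "".join(col(i) for i in range(num))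
-- ===== Notes on version B (the rewrite author's own statement) =====
-- stated objective: simpler
-- what changed: Replaced the stateful accumulator loop (running string s and resettable counter n) with a stateless ''.join over range(num), computing each column's number directly from its index by a closed positional formula.
import Mathlib
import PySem

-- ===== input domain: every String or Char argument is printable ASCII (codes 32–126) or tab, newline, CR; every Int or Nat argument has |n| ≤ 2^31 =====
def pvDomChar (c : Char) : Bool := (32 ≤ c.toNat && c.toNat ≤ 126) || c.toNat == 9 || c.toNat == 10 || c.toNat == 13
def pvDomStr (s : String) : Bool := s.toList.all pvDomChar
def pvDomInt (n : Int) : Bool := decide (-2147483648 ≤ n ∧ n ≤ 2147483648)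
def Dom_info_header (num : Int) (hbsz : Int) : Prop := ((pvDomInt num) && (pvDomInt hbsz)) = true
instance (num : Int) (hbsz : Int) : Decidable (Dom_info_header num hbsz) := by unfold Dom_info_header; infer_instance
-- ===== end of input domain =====

-- B replaces A's stateful string/counter accumulator with a stateless join over the
-- range, computing each column's number directly from its index (simpler decomposition).

-- ===== PORT A =====
-- A's loop: state (s, n); i ≠ hbsz appends "   " + str(n) and bumps n, else resets n and appends " ".
def infoStepA (hbsz : Int) (st : String × Int) (i : Int) : String × Int :=
  if i ≠ hbsz then (st.1 ++ "   " ++ PySem.Int.toStr st.2, st.2 + 1)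
  else (st.1 ++ " ", 0)

def info_header (num : Int) (hbsz : Int) : String :=
  ((PySem.List.pyRange 0 num 1).foldl (infoStepA hbsz) ("       ", 0)).1

-- ===== PORT B =====
def infoCol (hbsz : Int) (i : Int) : String :=
  if i == hbsz then " "
  else "   " ++ PySem.Int.toStr (if hbsz < 0 ∨ i < hbsz then i else i - hbsz - 1)

def info_header_alt (num : Int) (hbsz : Int) : String :=
  "       " ++ String.join ((PySem.List.pyRange 0 num 1).map (infoCol hbsz))

-- ===== PRECONDITION & SPEC =====
def Spec_info_header (num : Int) (hbsz : Int) (out : String) : Prop := out = info_header_alt num hbsz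
instance (num : Int) (hbsz : Int) (out : String) : Decidable (Spec_info_header num hbsz out) := by unfold Spec_info_header; infer_instance

-- ===== CLAIM (what is proved, stated in full; the proofs are below) =====
def Claim_equal_info_header : Prop := ∀ (num : Int) (hbsz : Int), Dom_info_header num hbsz → Spec_info_header num hbsz (info_header num hbsz)

-- ===== LEMMAS AND PROOFS =====

-- value of A's counter after processing range(m)
def infoCnt (hbsz : Int) (m : Nat) : Int :=
  if hbsz < 0 ∨ (m : Int) ≤ hbsz then (m : Int) else (m : Int) - hbsz - 1

theorem info_loop_inv (hbsz : Int) (m : Nat) :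
    (PySem.List.pyRange 0 (m : Int) 1).foldl (infoStepA hbsz) ("       ", 0)
      = ("       " ++ String.join ((PySem.List.pyRange 0 (m : Int) 1).map (infoCol hbsz)),
         infoCnt hbsz m) := by
  induction m with
  | zero =>
      simp [String.join, infoCnt]
  | succ m ih =>
      have hr : PySem.List.pyRange 0 ((m : Int) + 1) 1
          = PySem.List.pyRange 0 (m : Int) 1 ++ [(m : Int)] :=
        PySem.List.pyRange_one_succ_right (by omega)
      push_cast
      rw [hr, List.foldl_append, ih, List.map_append]
      by_cases hm : (m : Int) = hbsz
      · -- the reset column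
        have : infoStepA hbsz
            ("       " ++ String.join ((PySem.List.pyRange 0 (m : Int) 1).map (infoCol hbsz)),
              infoCnt hbsz m) (m : Int)
            = ("       " ++ String.join ((PySem.List.pyRange 0 (m : Int) 1).map (infoCol hbsz)) ++ " ", 0) := by
          simp [infoStepA, hm]
        rw [List.foldl_cons, List.foldl_nil, this]
        simp only [Prod.mk.injEq]
        constructor
        · simp [infoCol, hm, String.join, String.append_assoc]
        · unfold infoCnt
          split_ifs <;> omega
      · -- an ordinary numbered column
        have hcnt : infoCnt hbsz m
            = (if hbsz < 0 ∨ (m : Int) < hbsz then (m : Int) else (m : Int) - hbsz - 1) := by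
          unfold infoCnt
          split_ifs <;> omega
        have : infoStepA hbsz
            ("       " ++ String.join ((PySem.List.pyRange 0 (m : Int) 1).map (infoCol hbsz)),
              infoCnt hbsz m) (m : Int)
            = ("       " ++ String.join ((PySem.List.pyRange 0 (m : Int) 1).map (infoCol hbsz))
                ++ "   " ++ PySem.Int.toStr (infoCnt hbsz m), infoCnt hbsz m + 1) := by
          simp [infoStepA, hm]
        rw [List.foldl_cons, List.foldl_nil, this]
        simp only [Prod.mk.injEq]
        constructor
        · simp [infoCol, hm, hcnt, String.join, String.append_assoc]
        · unfold infoCnt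
          split_ifs <;> omega

theorem info_header_agrees (num hbsz : Int) : info_header num hbsz = info_header_alt num hbsz := by
  by_cases h : num ≤ 0
  · have hr : PySem.List.pyRange 0 num 1 = [] := by
      simp [PySem.List.pyRange_one]
      omega
    simp [info_header, info_header_alt, hr, String.join]
  · rw [not_le] at h
    have hnum : ((num.toNat : Nat) : Int) = num := Int.toNat_of_nonneg (by omega)
    unfold info_header info_header_alt
    rw [← hnum, info_loop_inv]

-- ===== VERDICT (by name: the statement is the Claim_ definition above) =====
theorem info_header_spec : Claim_equal_info_header := by
  intro num hbsz _
  exact info_header_agrees num hbsz
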